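-- pv_equiv track=rewrite | github.com/Diomandeee/nko-brain-scanner | nko/phonetics.py | int_to_nko_digits
-- ===== SOURCE A (Python) =====
-- from typing import Dict, List, Optional, Sequence, Tuple
--
-- _DIGITS: Dict[str, Tuple[int, str]] = {
--     "߀": (0, "fuyi"),
--     "߁": (1, "kelen"),
--     "߂": (2, "fila"),
--     "߃": (3, "saba"),
--     "߄": (4, "naani"),
--     "߅": (5, "duuru"),
--     "߆": (6, "wɔɔrɔ"),
--     "߇": (7, "wolonwula"),
--     "߈": (8, "segin"),
--     "߉": (9, "kɔnɔntɔ"),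
-- }
--
-- def int_to_nko_digits(n: int) -> str:
--     """Convert a non-negative integer to N'Ko digit string."""
--     if n < 0:
--         raise ValueError("Negative numbers not supported")
--     if n == 0:
--         return "߀"
--     # Build reverse map
--     val_to_char = {v: ch for ch, (v, _) in _DIGITS.items()}
--     result: List[str] = []
--     while n > 0:
--         result.append(val_to_char[n % 10])
--         n //= 10
--     # N'Ko is RTL, but digit string representation is same order
--     return "".join(reversed(result))
-- ===== SOURCE B (Python) =====
-- from typing import Dict, Tuple
--
-- _DIGITS: Dict[str, Tuple[int, str]] = {
--     "߀": (0, "fuyi"),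
--     "߁": (1, "kelen"),
--     "߂": (2, "fila"),
--     "߃": (3, "saba"),
--     "߄": (4, "naani"),
--     "߅": (5, "duuru"),
--     "߆": (6, "wɔɔrɔ"),
--     "߇": (7, "wolonwula"),
--     "߈": (8, "segin"),
--     "߉": (9, "kɔnɔntɔ"),
-- }
--
-- _TABLE = str.maketrans({str(v): ch for ch, (v, _) in _DIGITS.items()})
--
-- def int_to_nko_digits(n: int) -> str:
--     """Convert a non-negative integer to N'Ko digit string."""
--     if n < 0:
--         raise ValueError("Negative numbers not supported")
--     return str(n).translate(_TABLE)
-- ===== Notes on version B (the rewrite author's own statement) =====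
-- stated objective: idiomatic
-- what changed: Replaced the explicit mod-10/div-10 loop with appended list, final reversal and special case by Python's built-in str() conversion followed by a precomputed str.maketrans/translate digit table.
import Mathlib
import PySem

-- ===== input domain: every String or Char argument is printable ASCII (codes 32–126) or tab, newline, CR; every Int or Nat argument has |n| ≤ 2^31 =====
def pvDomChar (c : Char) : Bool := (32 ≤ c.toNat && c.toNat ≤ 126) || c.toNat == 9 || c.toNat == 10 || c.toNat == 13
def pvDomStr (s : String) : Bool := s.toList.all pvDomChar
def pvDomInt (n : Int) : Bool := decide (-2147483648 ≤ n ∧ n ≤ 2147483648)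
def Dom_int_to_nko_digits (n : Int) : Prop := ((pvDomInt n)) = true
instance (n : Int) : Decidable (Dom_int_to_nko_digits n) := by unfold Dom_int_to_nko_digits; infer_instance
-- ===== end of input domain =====

-- B replaces A's mod-10/div-10 loop + reversal by str(n) plus a precomputed digit translation table (idiomatic).

-- ===== PORT A =====
-- module-level _DIGITS dict (shared by both versions)
def pvDIGITS : PySem.Dict String (Int × String) := PySem.Dict.ofList
  [("߀", (0, "fuyi")), ("߁", (1, "kelen")), ("߂", (2, "fila")), ("߃", (3, "saba")),
   ("߄", (4, "naani")), ("߅", (5, "duuru")), ("߆", (6, "wɔɔrɔ")), ("߇", (7, "wolonwula")),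
   ("߈", (8, "segin")), ("߉", (9, "kɔnɔntɔ"))]

-- val_to_char = {v: ch for ch, (v, _) in _DIGITS.items()}
def pvValToChar : PySem.Dict Int String :=
  (PySem.Dict.items pvDIGITS).foldl (fun d p => PySem.Dict.insert d p.2.1 p.1) PySem.Dict.empty

-- while n > 0: result.append(val_to_char[n % 10]); n //= 10
-- (the dict lookup val_to_char[n % 10] always hits for n > 0, so Python's KeyError is unreachable; .getD "" is exact here)
def pvLoopA (n : Int) (result : List String) : List String :=
  if 0 < n then
    pvLoopA (PySem.Int.floordiv n 10)
      (result ++ [(PySem.Dict.get? pvValToChar (PySem.Int.mod n 10)).getD ""])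
  else result
termination_by n.toNat
decreasing_by
  simp only [PySem.Int.floordiv, Int.fdiv_eq_ediv]
  norm_num
  omega

def int_to_nko_digits (n : Int) : String :=
  if n < 0 then ""            -- Python raises ValueError here; excluded by Pre_
  else if n = 0 then "߀"
  else PySem.Str.join "" ((pvLoopA n []).reverse)

-- ===== PORT B =====
-- _TABLE = str.maketrans({str(v): ch for ch, (v, _) in _DIGITS.items()}) : maps each decimal digit char to its N'Ko char
def pvTable : PySem.Dict Char Char :=
  (PySem.Dict.items pvDIGITS).foldl
    (fun d p => PySem.Dict.insert d ((PySem.Int.toChars p.2.1).headD '?') (p.1.toList.headD '?'))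
    PySem.Dict.empty

-- str(n).translate(_TABLE): chars not in the table pass through unchanged
def int_to_nko_digits_alt (n : Int) : String :=
  if n < 0 then ""            -- Python raises ValueError here; excluded by Pre_
  else String.ofList ((PySem.Int.toChars n).map (fun c => (PySem.Dict.get? pvTable c).getD c))

-- ===== PRECONDITION & SPEC =====
-- Pre_ excludes exactly the negative inputs, on which A raises ValueError.
def Pre_int_to_nko_digits (n : Int) : Prop := 0 ≤ n
instance (n : Int) : Decidable (Pre_int_to_nko_digits n) := by unfold Pre_int_to_nko_digits; infer_instance
def pvWitness_int_to_nko_digits : Int := (7)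

def Spec_int_to_nko_digits (n : Int) (out : String) : Prop := out = int_to_nko_digits_alt n
instance (n : Int) (out : String) : Decidable (Spec_int_to_nko_digits n out) := by unfold Spec_int_to_nko_digits; infer_instance

-- ===== CLAIM (what is proved, stated in full; the proofs are below) =====
def Claim_equal_int_to_nko_digits : Prop := ∀ (n : Int), Dom_int_to_nko_digits n → Pre_int_to_nko_digits n → Spec_int_to_nko_digits n (int_to_nko_digits n)

-- ===== LEMMAS AND PROOFS =====

-- least-significant-first decimal digit characters of a positive natural
def pvDChars (m : Nat) : List Char :=
  if m = 0 then [] else Nat.digitChar (m % 10) :: pvDChars (m / 10)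
decreasing_by omega

-- B's per-character translation
def pvNko (c : Char) : Char := (PySem.Dict.get? pvTable c).getD c

lemma pvDigit_lookup (d : Nat) (hd : d < 10) :
    (PySem.Dict.get? pvValToChar ((d : Nat) : Int)).getD ""
      = String.ofList [pvNko (Nat.digitChar d)] := by
  interval_cases d <;> decide

lemma pvLoopA_eq (m : Nat) (acc : List String) :
    pvLoopA (m : Int) acc
      = acc ++ (pvDChars m).map (fun c => String.ofList [pvNko c]) := by
  induction m using Nat.strong_induction_on generalizing acc with
  | _ m ih =>
    rw [pvLoopA.eq_def, pvDChars.eq_def]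
    by_cases hm : m = 0
    · simp [hm]
    · have h0 : (0 : Int) < (m : Int) := by omega
      have hdiv : PySem.Int.floordiv (m : Int) 10 = ((m / 10 : Nat) : Int) := by
        simp only [PySem.Int.floordiv, Int.fdiv_eq_ediv]
        norm_num
      have hmod : PySem.Int.mod (m : Int) 10 = ((m % 10 : Nat) : Int) := by
        simp only [PySem.Int.mod, Int.fmod_eq_emod]
        norm_num
      rw [if_pos h0, if_neg hm, hdiv, hmod,
          ih (m / 10) (by omega), pvDigit_lookup (m % 10) (by omega)]
      simp

lemma pvToDigitsCore_eq (f m : Nat) (acc : List Char) (h1 : 0 < m) (h2 : m ≤ f) :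
    Nat.toDigitsCore 10 f m acc = (pvDChars m).reverse ++ acc := by
  induction m using Nat.strong_induction_on generalizing f acc with
  | _ m ih =>
    obtain ⟨f', rfl⟩ : ∃ f', f = f' + 1 := ⟨f - 1, by omega⟩
    rw [Nat.toDigitsCore]
    by_cases hq : m / 10 = 0
    · rw [if_pos hq, pvDChars, if_neg (by omega), pvDChars, hq]
      simp
    · rw [if_neg hq,
          ih (m / 10) (by omega) f' (Nat.digitChar (m % 10) :: acc) (by omega) (by omega),
          pvDChars.eq_def m, if_neg (by omega), pvDChars.eq_def (m / 10), if_neg hq]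
      simp

lemma pvJoin_singletons (l : List Char) :
    PySem.Str.join "" (l.map (fun c => String.ofList [pvNko c]))
      = String.ofList (l.map pvNko) := by
  simp only [PySem.Str.join, PySem.Chars.join]
  congr 1
  induction l with
  | nil => rfl
  | cons c l ih =>
    simp only [List.map_cons, List.intercalate] at *
    cases l <;> simp_all

-- ===== VERDICT (by name: the statement is the Claim_ definition above) =====
theorem int_to_nko_digits_spec : Claim_equal_int_to_nko_digits := by
  intro n _ hpre
  have hn : (0:Int) ≤ n := hpre
  unfold Spec_int_to_nko_digits int_to_nko_digits int_to_nko_digits_alt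
  by_cases h0 : n = 0
  · subst h0; decide
  · rw [if_neg (show ¬ n < 0 by omega), if_neg (show ¬ n < 0 by omega), if_neg h0]
    have hm : n = ((n.toNat : Nat) : Int) := by omega
    have hpos : 0 < n.toNat := by omega
    rw [hm, pvLoopA_eq n.toNat []]
    have htc : PySem.Int.toChars ((n.toNat : Nat) : Int) = (pvDChars n.toNat).reverse := by
      simp only [PySem.Int.toChars]
      rw [if_neg (by omega)]
      have : (((n.toNat : Nat) : Int)).toNat = n.toNat := by omega
      rw [this, Nat.toDigits, pvToDigitsCore_eq (n.toNat + 1) n.toNat [] hpos (by omega)]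
      simp
    rw [htc]
    simp only [List.nil_append, ← List.map_reverse]
    rw [pvJoin_singletons]
    rfl
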